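-- pv_equiv track=rewrite | github.com/Asterius27/BTC-paper-artifacts | SessionManagementAnalyserApp/paper_report_flask.py | buildResultsDict
-- ===== SOURCE A (Python) =====
-- def buildResultsDict(resultRepos, subDicts):
--     result = {}
--     for key in resultRepos:
--         flag = False
--         for resultDict in subDicts:
--             if key in resultDict:
--                 if not flag:
--                     flag = True
--                     result[key] = {}
--                     if "url" in resultDict:
--                         result[key]["url"] = resultDict[key]["url"]
--                     result[key]["file"] = resultDict[key]["file"]
--                     result[key]["result"] = resultDict[key]["result"]
--                 else:
--                     result[key]["result"] += resultDict[key]["result"]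
--     return result
-- ===== SOURCE B (Python) =====
-- def buildResultsDict(resultRepos, subDicts):
--     # Loop interchange: one pass over subDicts (outer) and each sub-dict's own keys
--     # (inner), aggregating into agg; then emit in resultRepos order.
--     wanted = set(resultRepos)
--     agg = {}
--     for d in subDicts:
--         for k in d:
--             if k not in wanted:
--                 continue
--             if k in agg:
--                 agg[k]["result"] += d[k]["result"]
--             else:
--                 entry = {}
--                 if "url" in d:
--                     entry["url"] = d[k]["url"]
--                 entry["file"] = d[k]["file"]
--                 entry["result"] = d[k]["result"]
--                 agg[k] = entry
--     return {k: agg[k] for k in resultRepos if k in agg}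
-- ===== Notes on version B (the rewrite author's own statement) =====
-- stated objective: alternative
-- what changed: The loops are interchanged: instead of A's per-key scan over all subDicts with a first-match flag, B makes a single pass over subDicts iterating each sub-dict's own keys (filtered by a set of resultRepos), aggregating entries in a dict keyed by repo, and finally emits them in resultRepos order by a comprehension.
import Mathlib
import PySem

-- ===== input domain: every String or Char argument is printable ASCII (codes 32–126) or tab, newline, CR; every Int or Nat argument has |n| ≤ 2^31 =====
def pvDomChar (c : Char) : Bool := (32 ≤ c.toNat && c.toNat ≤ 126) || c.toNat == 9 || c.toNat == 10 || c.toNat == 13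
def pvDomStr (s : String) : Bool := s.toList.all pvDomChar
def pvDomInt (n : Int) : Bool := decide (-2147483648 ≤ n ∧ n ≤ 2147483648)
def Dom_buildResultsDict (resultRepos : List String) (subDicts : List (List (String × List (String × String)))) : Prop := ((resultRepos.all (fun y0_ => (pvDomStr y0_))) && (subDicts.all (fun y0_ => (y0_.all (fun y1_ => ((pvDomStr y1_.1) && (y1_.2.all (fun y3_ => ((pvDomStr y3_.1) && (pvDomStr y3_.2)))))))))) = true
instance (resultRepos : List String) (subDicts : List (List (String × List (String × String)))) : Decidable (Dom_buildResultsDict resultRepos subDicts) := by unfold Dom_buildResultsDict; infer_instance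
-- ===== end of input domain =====

-- B interchanges A's loops: one pass over subDicts iterating each sub-dict's own keys into a per-repo aggregate dict, then emits in resultRepos order; same result, different traversal.


-- ===== PORT A =====
-- "result" contribution of a sub-dict for a key: resultDict[key]["result"] (default "" only outside Pre_)
def pvRes (key : String) (rd : List (String × List (String × String))) : String :=
  (PySem.Dict.mk ((PySem.Dict.mk rd).getD key [])).getD "result" ""

-- A's inner-loop body: state = (flag, result); mutations of result[key] are Dict.modify at key
def pvStepA (key : String)
    (st : Bool × PySem.Dict String (PySem.Dict String String))
    (rd : List (String × List (String × String))) :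
    Bool × PySem.Dict String (PySem.Dict String String) :=
  let d := PySem.Dict.mk rd
  if d.contains key then
    if st.1 = false then
      let inner := PySem.Dict.mk (d.getD key [])
      let r1 := st.2.insert key PySem.Dict.empty
      let r2 := if d.contains "url" then
          r1.modify key PySem.Dict.empty (fun e => e.insert "url" (inner.getD "url" ""))
        else r1
      let r3 := r2.modify key PySem.Dict.empty (fun e => e.insert "file" (inner.getD "file" ""))
      let r4 := r3.modify key PySem.Dict.empty (fun e => e.insert "result" (inner.getD "result" ""))
      (true, r4)
    else
      (true, st.2.modify key PySem.Dict.empty (fun e => e.modify "result" "" (· ++ pvRes key rd)))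
  else st

def buildResultsDict (resultRepos : List String) (subDicts : List (List (String × List (String × String)))) : List (String × List (String × String)) :=
  ((resultRepos.foldl
      (fun result key => (subDicts.foldl (pvStepA key) (false, result)).2)
      PySem.Dict.empty).items.map (fun p => (p.1, p.2.items)))

-- ===== PORT B =====
-- B: fresh entry for key k built from sub-dict d (Python's `entry = {}; …; agg[k] = entry`)
def pvSeed (d : List (String × List (String × String))) (k : String) : PySem.Dict String String :=
  let dd := PySem.Dict.mk d
  let di := PySem.Dict.mk (dd.getD k [])
  let e1 := if dd.contains "url" then (PySem.Dict.empty).insert "url" (di.getD "url" "") else PySem.Dict.empty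
  let e2 := e1.insert "file" (di.getD "file" "")
  e2.insert "result" (di.getD "result" "")

-- B's inner-loop body over one sub-dict d's own keys (Python's `for k in d: …`)
def pvStepB (wanted : PySem.Set String) (d : List (String × List (String × String)))
    (agg : PySem.Dict String (PySem.Dict String String)) (k : String) :
    PySem.Dict String (PySem.Dict String String) :=
  if wanted.contains k then
    if agg.contains k then
      agg.modify k PySem.Dict.empty (fun e => e.modify "result" "" (· ++ pvRes k d))
    else agg.insert k (pvSeed d k)
  else agg

def buildResultsDict_alt (resultRepos : List String) (subDicts : List (List (String × List (String × String)))) : List (String × List (String × String)) :=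
  let wanted := PySem.Set.ofList resultRepos
  let agg := subDicts.foldl
    (fun agg d => (PySem.List.dedup (d.map Prod.fst)).foldl (pvStepB wanted d) agg)
    PySem.Dict.empty
  ((resultRepos.foldl
      (fun res k => if agg.contains k then res.insert k (agg.getD k PySem.Dict.empty) else res)
      PySem.Dict.empty).items.map (fun p => (p.1, p.2.items)))

-- ===== PRECONDITION & SPEC =====
-- Pre_ excludes exactly the inputs where A raises KeyError: among the sub-dicts containing a requested
-- key, the first one's entry must have "file" and "result" (and "url" when the sub-dict has a top-level
-- "url" key), and every later one's entry must have "result".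
def pvPreKey (key : String) (subDicts : List (List (String × List (String × String)))) : Bool :=
  match subDicts.filter (fun rd => (PySem.Dict.mk rd).contains key) with
  | [] => true
  | head :: tail =>
    let hd := PySem.Dict.mk head
    let hi := PySem.Dict.mk (hd.getD key [])
    (!hd.contains "url" || hi.contains "url") && hi.contains "file" && hi.contains "result" &&
      tail.all (fun rd => (PySem.Dict.mk ((PySem.Dict.mk rd).getD key [])).contains "result")

def Pre_buildResultsDict (resultRepos : List String) (subDicts : List (List (String × List (String × String)))) : Prop :=
  resultRepos.all (fun key => pvPreKey key subDicts) = true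
instance (resultRepos : List String) (subDicts : List (List (String × List (String × String)))) : Decidable (Pre_buildResultsDict resultRepos subDicts) := by unfold Pre_buildResultsDict; infer_instance

def pvWitness_buildResultsDict : List String × (List (List (String × List (String × String)))) :=
  (["a", "b"], [[("a", [("file", "f"), ("result", "r")])], [("a", [("result", "s")])]])

def Spec_buildResultsDict (resultRepos : List String) (subDicts : List (List (String × List (String × String)))) (out : List (String × List (String × String))) : Prop := out = buildResultsDict_alt resultRepos subDicts
instance (resultRepos : List String) (subDicts : List (List (String × List (String × String)))) (out : List (String × List (String × String))) : Decidable (Spec_buildResultsDict resultRepos subDicts out) := by unfold Spec_buildResultsDict; infer_instance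

-- ===== CLAIM (what is proved, stated in full; the proofs are below) =====
def Claim_equal_buildResultsDict : Prop := ∀ (resultRepos : List String) (subDicts : List (List (String × List (String × String)))), Dom_buildResultsDict resultRepos subDicts → Pre_buildResultsDict resultRepos subDicts → Spec_buildResultsDict resultRepos subDicts (buildResultsDict resultRepos subDicts)

-- ===== LEMMAS AND PROOFS =====

-- the aggregated entry for key over the (nonempty) list of sub-dicts containing it
def pvEntryB (key : String) (head : List (String × List (String × String)))
    (tail : List (List (String × List (String × String)))) : PySem.Dict String String :=
  let hd := PySem.Dict.mk head
  let hi := PySem.Dict.mk (hd.getD key [])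
  let e1 := if hd.contains "url" then (PySem.Dict.empty).insert "url" (hi.getD "url" "") else PySem.Dict.empty
  let e2 := e1.insert "file" (hi.getD "file" "")
  let total := tail.foldl (fun acc rd => acc ++ pvRes key rd) (hi.getD "result" "")
  e2.insert "result" total

-- Python's d[k] = f(d[k]) on a dict last written at k: modify collapses onto the insert
theorem pvModifyInsert {v : Type} (r : PySem.Dict String v) (key : String) (e d0 : v) (f : v -> v) :
    (r.insert key e).modify key d0 f = r.insert key (f e) := by
  show (r.insert key e).insert key (f ((r.insert key e).getD key d0)) = _
  rw [PySem.Dict.getD_insert_self, PySem.Dict.insert_insert_self]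

-- once the flag is set, A's inner loop only accumulates into result[key]["result"]
theorem pvFoldTrue (key : String) (ds : List (List (String × List (String × String))))
    (r : PySem.Dict String (PySem.Dict String String)) :
    ds.foldl (pvStepA key) (true, r) =
      (true, (ds.filter (fun rd => (PySem.Dict.mk rd).contains key)).foldl
        (fun r rd => r.modify key PySem.Dict.empty (fun e => e.modify "result" "" (· ++ pvRes key rd))) r) := by
  induction ds generalizing r with
  | nil => rfl
  | cons d t ih =>
    by_cases h : (PySem.Dict.mk d).contains key = true
    · rw [List.foldl_cons,
        show pvStepA key (true, r) d =
            (true, r.modify key PySem.Dict.empty (fun e => e.modify "result" "" (· ++ pvRes key d))) from by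
          simp only [pvStepA]; rw [if_pos h, if_neg (by simp)],
        ih, List.filter_cons, if_pos h, List.foldl_cons]
    · rw [List.foldl_cons,
        show pvStepA key (true, r) d = (true, r) from by simp only [pvStepA]; rw [if_neg h],
        ih, List.filter_cons, if_neg h]

-- accumulating into result[key] keeps the dict in the form r.insert key (e2.insert "result" _)
theorem pvFoldAcc (key : String) (ts : List (List (String × List (String × String))))
    (r : PySem.Dict String (PySem.Dict String String)) (e2 : PySem.Dict String String) (v : String) :
    ts.foldl (fun r rd => r.modify key PySem.Dict.empty (fun e => e.modify "result" "" (· ++ pvRes key rd)))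
        (r.insert key (e2.insert "result" v)) =
      r.insert key (e2.insert "result" (ts.foldl (fun acc rd => acc ++ pvRes key rd) v)) := by
  induction ts generalizing v with
  | nil => rfl
  | cons d t ih =>
    have h1 : (r.insert key (e2.insert "result" v)).modify key PySem.Dict.empty
        (fun e => e.modify "result" "" (· ++ pvRes key d)) =
        r.insert key (e2.insert "result" (v ++ pvRes key d)) := by
      rw [pvModifyInsert, pvModifyInsert]
    rw [List.foldl_cons, h1, ih, List.foldl_cons]

-- A's inner loop over subDicts seeds from the first match and accumulates over the rest
theorem pvInnerEq (key : String) (ds : List (List (String × List (String × String))))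
    (r : PySem.Dict String (PySem.Dict String String)) :
    (ds.foldl (pvStepA key) (false, r)).2 =
      (match ds.filter (fun rd => (PySem.Dict.mk rd).contains key) with
       | [] => r
       | head :: tail => r.insert key (pvEntryB key head tail)) := by
  induction ds generalizing r with
  | nil => rfl
  | cons d t ih =>
    by_cases h : (PySem.Dict.mk d).contains key = true
    · rw [List.foldl_cons]
      simp only [pvStepA]
      rw [if_pos h]
      simp only [if_true]
      simp only [List.filter_cons, if_pos h, pvEntryB]
      by_cases hu : (PySem.Dict.mk d).contains "url" = true
      · rw [if_pos hu, pvModifyInsert, pvModifyInsert, pvModifyInsert, pvFoldTrue, if_pos hu, pvFoldAcc]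
      · rw [if_neg hu, pvModifyInsert, pvModifyInsert, pvFoldTrue, if_neg hu, pvFoldAcc]
    · rw [List.foldl_cons,
        show pvStepA key (false, r) d = (false, r) from by simp only [pvStepA]; rw [if_neg h],
        ih]
      simp only [List.filter_cons, if_neg h]

-- the per-key value B's aggregate carries: seeded from the first sub-dict containing the key
def pvAcc (key : String) (ms : List (List (String × List (String × String)))) :
    Option (PySem.Dict String String) :=
  match ms with
  | [] => none
  | head :: tail => some (pvEntryB key head tail)

-- extending the aggregate by one more matching sub-dict
theorem pvEntryExtend (key : String) (h : List (String × List (String × String)))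
    (t : List (List (String × List (String × String)))) (d : List (String × List (String × String))) :
    (pvEntryB key h t).modify "result" "" (· ++ pvRes key d) = pvEntryB key h (t ++ [d]) := by
  simp only [pvEntryB, pvModifyInsert, List.foldl_append, List.foldl_cons, List.foldl_nil]

-- a key's membership in a sub-dict's (deduplicated) key list is Dict.contains
theorem pvMemDedupKeys (d : List (String × List (String × String))) (k : String) :
    k ∈ PySem.List.dedup (d.map Prod.fst) ↔ (PySem.Dict.mk d).contains k = true := by
  rw [PySem.List.mem_dedup, PySem.Dict.contains_mk, List.any_eq_true]
  constructor
  · intro hk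
    rcases List.mem_map.1 hk with ⟨p, hp, rfl⟩
    exact ⟨p, hp, by simp⟩
  · rintro ⟨p, hp, he⟩
    exact List.mem_map.2 ⟨p, hp, by simpa using beq_iff_eq.1 he⟩

-- pvStepB touches only its own key
theorem pvStepBGetNe (wanted : PySem.Set String) (d : List (String × List (String × String)))
    (agg : PySem.Dict String (PySem.Dict String String)) (j k : String) (hne : k ≠ j) :
    (pvStepB wanted d agg j).get? k = agg.get? k := by
  simp only [pvStepB]
  split_ifs with h1 h2
  · show ((agg.insert j _).get? k) = _
    rw [PySem.Dict.get?_insert_of_ne _ _ hne]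
  · rw [PySem.Dict.get?_insert_of_ne _ _ hne]
  · rfl

-- effect of B's inner loop (over one sub-dict's distinct keys) on any lookup
theorem pvInnerBGet (wanted : PySem.Set String) (d : List (String × List (String × String)))
    (ks : List String) (k : String) :
    ∀ (agg : PySem.Dict String (PySem.Dict String String)), ks.Nodup →
    (ks.foldl (pvStepB wanted d) agg).get? k =
      if k ∈ ks ∧ wanted.contains k = true then
        some (match agg.get? k with
              | none => pvSeed d k
              | some e => e.modify "result" "" (· ++ pvRes k d))
      else agg.get? k := by
  induction ks with
  | nil => intro agg _; simp
  | cons j t ih =>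
    intro agg hnd
    rcases List.nodup_cons.1 hnd with ⟨hjt, hndt⟩
    rw [List.foldl_cons, ih _ hndt]
    by_cases hkj : k = j
    · subst hkj
      by_cases hw : wanted.contains k = true
      · have hkt : k ∉ t := hjt
        rw [if_neg (by tauto), if_pos ⟨List.mem_cons_self, hw⟩]
        simp only [pvStepB, if_pos hw]
        by_cases hc : agg.contains k = true
        · rw [if_pos hc]
          have hs : (agg.get? k).isSome = true := by
            rw [← PySem.Dict.contains_eq_isSome_get? agg k]; exact hc
          rcases Option.isSome_iff_exists.1 hs with ⟨e, he⟩
          show ((agg.insert k _).get? k) = _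
          rw [PySem.Dict.get?_insert_self, he,
            PySem.Dict.getD_eq_get?_getD, he]
          rfl
        · rw [if_neg hc, PySem.Dict.get?_insert_self,
            (PySem.Dict.get?_eq_none_iff_contains _ _).2 (by simpa using hc)]
      · rw [show pvStepB wanted d agg k = agg from by simp only [pvStepB]; rw [if_neg hw]]
        rw [if_neg (by tauto), if_neg (by tauto)]
    · rw [pvStepBGetNe _ _ _ _ _ hkj]
      by_cases hkt : k ∈ t ∧ wanted.contains k = true
      · rw [if_pos hkt, if_pos ⟨List.mem_cons_of_mem _ hkt.1, hkt.2⟩]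
      · rw [if_neg hkt, if_neg (by
          rintro ⟨hm, hw⟩
          rcases List.mem_cons.1 hm with h | h
          · exact hkj h
          · exact hkt ⟨h, hw⟩)]

-- invariant of B's outer pass: the aggregate holds, per wanted key, the fold over the matches so far
theorem pvAggGet (wanted : PySem.Set String) (sd : List (List (String × List (String × String))))
    (F : String → List (List (String × List (String × String))))
    (agg : PySem.Dict String (PySem.Dict String String))
    (hinv : ∀ k, agg.get? k = if wanted.contains k = true then pvAcc k (F k) else none) (k : String) :
    (sd.foldl (fun agg d => (PySem.List.dedup (d.map Prod.fst)).foldl (pvStepB wanted d) agg) agg).get? k =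
      if wanted.contains k = true then
        pvAcc k (F k ++ sd.filter (fun rd => (PySem.Dict.mk rd).contains k)) else none := by
  induction sd generalizing F agg with
  | nil => simpa using hinv k
  | cons d t ih =>
    rw [List.foldl_cons]
    have step : ∀ j, ((PySem.List.dedup (d.map Prod.fst)).foldl (pvStepB wanted d) agg).get? j =
        if wanted.contains j = true then
          pvAcc j (F j ++ if (PySem.Dict.mk d).contains j = true then [d] else []) else none := by
      intro j
      rw [pvInnerBGet wanted d _ j agg (PySem.List.nodup_dedup _), hinv j]
      by_cases hw : wanted.contains j = true
      · by_cases hc : (PySem.Dict.mk d).contains j = true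
        · rw [if_pos ⟨(pvMemDedupKeys d j).2 hc, hw⟩, if_pos hw, if_pos hw, if_pos hc]
          cases hF : F j with
          | nil => simp [pvAcc, pvSeed, pvEntryB]
          | cons h tl => simp [pvAcc, pvEntryExtend]
        · rw [if_neg (fun hh => hc ((pvMemDedupKeys d j).1 hh.1)), if_pos hw, if_pos hw, if_neg hc,
            List.append_nil]
      · rw [if_neg (by tauto)]; simp only [if_neg hw]
    rw [ih (fun j => F j ++ if (PySem.Dict.mk d).contains j = true then [d] else []) _ step]
    by_cases hw : wanted.contains k = true
    · rw [if_pos hw, if_pos hw, List.filter_cons, List.append_assoc]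
      by_cases hc : (PySem.Dict.mk d).contains k = true
      · rw [if_pos hc, if_pos hc]; rfl
      · rw [if_neg hc, if_neg hc]; rfl
    · rw [if_neg hw, if_neg hw]

-- ===== VERDICT (by name: the statement is the Claim_ definition above) =====
theorem buildResultsDict_spec : Claim_equal_buildResultsDict := by
  intro rr sd _ _
  unfold Spec_buildResultsDict buildResultsDict buildResultsDict_alt
  simp only [pvInnerEq]
  have hagg : ∀ k, ((sd.foldl (fun agg d => (PySem.List.dedup (d.map Prod.fst)).foldl
        (pvStepB (PySem.Set.ofList rr) d) agg) PySem.Dict.empty)).get? k =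
      if (PySem.Set.ofList rr).contains k = true then
        pvAcc k (sd.filter (fun rd => (PySem.Dict.mk rd).contains k)) else none := by
    intro k
    have := pvAggGet (PySem.Set.ofList rr) sd (fun _ => []) PySem.Dict.empty
      (fun k => by simp [pvAcc, PySem.Dict.get?_empty]) k
    simpa using this
  congr 2
  apply PySem.List.foldl_congr_mem
  intro acc key hmem
  have hw : (PySem.Set.ofList rr).contains key = true :=
    (PySem.Set.contains_iff _ _).2 ((PySem.Set.mem_ofList _ _).2 hmem)
  rw [PySem.Dict.contains_eq_isSome_get?, hagg key, if_pos hw]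
  cases hf : sd.filter (fun rd => (PySem.Dict.mk rd).contains key) with
  | nil => simp [pvAcc]
  | cons h t =>
    simp only [pvAcc, Option.isSome_some, if_true]
    rw [PySem.Dict.getD_eq_get?_getD, hagg key, if_pos hw, hf]
    rfl
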